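-- pv_equiv track=rewrite | github.com/tnenglert/CodeIR | tests/eval/runners/run_l0_identification.py | _sample_entity_ids_by_type
-- ===== SOURCE A (Python) =====
-- from typing import Any, Dict, List, Optional
--
-- def _sample_entity_ids_by_type(
--     answers: Dict[str, Dict[str, Any]],
--     sample_size: Optional[int],
-- ) -> List[str]:
--     """Sample entities in a type-balanced way (class/function/method/property)."""
--     entity_ids = list(answers.keys())
--     if not sample_size or sample_size <= 0:
--         return entity_ids
--
--     by_type: Dict[str, List[str]] = {}
--     for entity_id in sorted(entity_ids):
--         entity_type = str(answers[entity_id].get("entity_type", "unknown"))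
--         by_type.setdefault(entity_type, []).append(entity_id)
--
--     selected: List[str] = []
--     type_order = sorted(by_type.keys())
--     while len(selected) < sample_size:
--         progressed = False
--         for entity_type in type_order:
--             bucket = by_type.get(entity_type, [])
--             if not bucket:
--                 continue
--             selected.append(bucket.pop(0))
--             progressed = True
--             if len(selected) >= sample_size:
--                 break
--         if not progressed:
--             break
--
--     return selected
-- ===== SOURCE B (Python) =====
-- from typing import Any, Dict, List, Optional
--
-- def _sample_entity_ids_by_type(
--     answers: Dict[str, Dict[str, Any]],
--     sample_size: Optional[int],
-- ) -> List[str]: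
--     """Sample entities in a type-balanced way (class/function/method/property)."""
--     entity_ids = list(answers.keys())
--     if not sample_size or sample_size <= 0:
--         return entity_ids
--
--     def etype(entity_id: str) -> str:
--         return str(answers[entity_id].get("entity_type", "unknown"))
--
--     ids_sorted = sorted(entity_ids)
--     types = sorted({etype(e) for e in ids_sorted})
--     buckets = [[e for e in ids_sorted if etype(e) == t] for t in types]
--
--     # Round robin = transpose-then-flatten, truncated to sample_size.
--     width = max((len(b) for b in buckets), default=0)
--     flat = [b[i] for i in range(width) for b in buckets if i < len(b)]
--     return flat[:sample_size]
-- ===== Notes on version B (the rewrite author's own statement) =====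
-- stated objective: alternative
-- what changed: The incremental while-loop that repeatedly pops the front of each type bucket (mutating the dict, with progressed/break flags) is replaced by computing the round-robin order as a transpose-then-flatten of the per-type bucket lists (row i collects the i-th element of every bucket) and truncating to sample_size.
import Mathlib
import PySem

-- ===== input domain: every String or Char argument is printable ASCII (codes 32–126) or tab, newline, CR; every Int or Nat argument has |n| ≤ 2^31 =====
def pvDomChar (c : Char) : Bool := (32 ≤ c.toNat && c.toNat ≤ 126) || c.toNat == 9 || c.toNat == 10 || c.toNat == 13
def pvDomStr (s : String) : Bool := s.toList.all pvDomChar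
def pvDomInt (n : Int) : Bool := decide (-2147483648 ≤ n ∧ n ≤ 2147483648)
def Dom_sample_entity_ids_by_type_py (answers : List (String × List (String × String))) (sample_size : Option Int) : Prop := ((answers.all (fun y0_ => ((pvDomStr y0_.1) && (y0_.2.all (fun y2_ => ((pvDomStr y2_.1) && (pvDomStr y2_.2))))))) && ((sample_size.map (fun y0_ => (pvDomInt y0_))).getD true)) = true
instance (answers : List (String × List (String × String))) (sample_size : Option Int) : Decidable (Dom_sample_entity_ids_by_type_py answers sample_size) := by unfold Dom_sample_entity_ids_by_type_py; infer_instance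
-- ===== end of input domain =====

-- B replaces A's incremental pop-the-front while loop by a transpose-then-flatten round robin (alternative decomposition, similar cost).

-- ===== PORT A =====

-- str(answers[entity_id].get("entity_type", "unknown")); both programs apply it only to
-- entity_id ∈ answers.keys(), so the `answers[entity_id]` lookup (ported as getD _ []) is exact.
def pvEntityType (answers : PySem.Dict String (List (String × String))) (e : String) : String :=
  (PySem.Dict.ofList (answers.getD e [])).getD "entity_type" "unknown"

-- the inner `for entity_type in type_order` loop; returns (selected, by_type, progressed, broke)
def pvInnerA (n : Int) : List String → PySem.Dict String (List String) → List String → Bool →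
    List String × PySem.Dict String (List String) × Bool × Bool
  | [], d, sel, prog => (sel, d, prog, false)
  | t :: ts, d, sel, prog =>
    match d.getD t [] with
    | [] => pvInnerA n ts d sel prog
    | x :: rest =>
      let sel' := sel ++ [x]
      let d' := d.insert t rest          -- bucket.pop(0) mutates the list held by the dict
      if n ≤ (sel'.length : Int) then (sel', d', true, true)
      else pvInnerA n ts d' sel' true

-- the `while len(selected) < sample_size` loop; the fuel only makes it total (the loop pops ≥ 1
-- id per productive iteration, so the fuel passed below is never exhausted)
def pvWhileA (n : Int) : Nat → PySem.Dict String (List String) → List String → List String → List String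
  | 0, _, _, sel => sel
  | fuel+1, d, ts, sel =>
    if (sel.length : Int) < n then
      match pvInnerA n ts d sel false with
      | (sel', d', prog, broke) =>
        if broke then sel'
        else if prog then pvWhileA n fuel d' ts sel'
        else sel'
    else sel

def sample_entity_ids_by_type_py (answers : List (String × List (String × String))) (sample_size : Option Int) : List String :=
  let d := PySem.Dict.ofList answers
  let entity_ids := d.keys
  match sample_size with
  | none => entity_ids
  | some n =>
    if n ≤ 0 then entity_ids
    else
      let byType := (PySem.List.sorted entity_ids (fun x => x) false).foldl
          (fun bt e => bt.modify (pvEntityType d e) [] (fun b => b ++ [e])) PySem.Dict.empty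
      let type_order := PySem.List.sorted byType.keys (fun x => x) false
      pvWhileA n ((byType.values.map List.length).sum + 1) byType type_order []

-- ===== PORT B =====

def sample_entity_ids_by_type_py_alt (answers : List (String × List (String × String))) (sample_size : Option Int) : List String :=
  let d := PySem.Dict.ofList answers
  let entity_ids := d.keys
  match sample_size with
  | none => entity_ids
  | some n =>
    if n ≤ 0 then entity_ids
    else
      let ids_sorted := PySem.List.sorted entity_ids (fun x => x) false
      let types := PySem.List.sorted
          (PySem.Set.ofList (ids_sorted.map (fun e => pvEntityType d e))) (fun x => x) false
      let buckets := types.map (fun t => ids_sorted.filter (fun e => pvEntityType d e == t))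
      let width : Int := PySem.List.maxD (buckets.map (fun b => PySem.List.len b)) (fun x => x) 0
      let flat := (PySem.List.pyRange 0 width 1).flatMap
          (fun i => (buckets.filter (fun b => decide (i < PySem.List.len b))).map
            (fun b => PySem.List.pyGetD b i ""))   -- b[i]: the filter guarantees 0 ≤ i < len(b)
      PySem.List.slice flat none (some n)

-- ===== PRECONDITION & SPEC =====
def Spec_sample_entity_ids_by_type_py (answers : List (String × List (String × String))) (sample_size : Option Int) (out : List String) : Prop := out = sample_entity_ids_by_type_py_alt answers sample_size
instance (answers : List (String × List (String × String))) (sample_size : Option Int) (out : List String) : Decidable (Spec_sample_entity_ids_by_type_py answers sample_size out) := by unfold Spec_sample_entity_ids_by_type_py; infer_instance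

-- ===== CLAIM (what is proved, stated in full; the proofs are below) =====
def Claim_equal_sample_entity_ids_by_type_py : Prop := ∀ (answers : List (String × List (String × String))) (sample_size : Option Int), Dom_sample_entity_ids_by_type_py answers sample_size → Spec_sample_entity_ids_by_type_py answers sample_size (sample_entity_ids_by_type_py answers sample_size)

-- ===== LEMMAS AND PROOFS =====

-- the per-type buckets A's while loop works on, read off the dict in type_order
def pvBuckets (d : PySem.Dict String (List String)) (ts : List String) : List (List String) :=
  ts.map (fun t => d.getD t [])

def pvHeads (bs : List (List String)) : List String := bs.filterMap List.head?

-- full round robin over the buckets: head row ++ round robin of the tails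
def pvRR : Nat → List (List String) → List String
  | 0, _ => []
  | k+1, bs => pvHeads bs ++ pvRR k (bs.map List.tail)

lemma pvHeads_eq_nil_iff (bs : List (List String)) : pvHeads bs = [] ↔ ∀ b ∈ bs, b = [] := by
  simp [pvHeads, List.filterMap_eq_nil_iff]

lemma pvRR_all_nil (k : Nat) (bs : List (List String)) (h : ∀ b ∈ bs, b = []) :
    pvRR k bs = [] := by
  induction k generalizing bs with
  | zero => rfl
  | succ k ih =>
    simp only [pvRR]
    rw [(pvHeads_eq_nil_iff bs).mpr h, ih]
    · rfl
    · intro b hb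
      obtain ⟨b', hb', rfl⟩ := List.mem_map.mp hb
      rw [h b' hb']; rfl

lemma pvSum_tails (bs : List (List String)) :
    (pvHeads bs).length + ((bs.map List.tail).map List.length).sum = (bs.map List.length).sum := by
  induction bs with
  | nil => rfl
  | cons b bs ih =>
    cases b <;> simp [pvHeads] at * <;> omega

lemma pvInnerA_no_break (n : Int) (ts : List String) (d : PySem.Dict String (List String))
    (sel : List String) (prog : Bool) (hts : ts.Nodup)
    (h : (sel.length : Int) + (pvHeads (pvBuckets d ts)).length < n) :
    (pvInnerA n ts d sel prog).1 = sel ++ pvHeads (pvBuckets d ts) ∧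
    (pvInnerA n ts d sel prog).2.2.1 = (prog || !(pvHeads (pvBuckets d ts)).isEmpty) ∧
    (pvInnerA n ts d sel prog).2.2.2 = false ∧
    ∀ u, (pvInnerA n ts d sel prog).2.1.getD u [] =
      if u ∈ ts then (d.getD u []).tail else d.getD u [] := by
  induction ts generalizing d sel prog with
  | nil => simp [pvInnerA, pvHeads, pvBuckets]
  | cons t ts ih =>
    obtain ⟨htn, hts'⟩ := List.nodup_cons.mp hts
    cases hb : d.getD t [] with
    | nil =>
      have hbk : pvBuckets d (t :: ts) = [] :: pvBuckets d ts := by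
        simp [pvBuckets, hb]
      rw [hbk] at h ⊢
      have hH : pvHeads ([] :: pvBuckets d ts) = pvHeads (pvBuckets d ts) := by
        simp [pvHeads]
      rw [hH] at h ⊢
      simp only [pvInnerA, hb]
      obtain ⟨h1, h2, h3, h4⟩ := ih d sel prog hts' h
      refine ⟨h1, h2, h3, ?_⟩
      intro u
      rw [h4 u]
      by_cases hu : u ∈ ts
      · simp [hu]
      · by_cases hut : u = t
        · subst hut; simp [hu, hb]
        · simp [hu, hut]
    | cons x rest =>
      have hbk : pvBuckets d (t :: ts) = (x :: rest) :: pvBuckets d ts := by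
        simp [pvBuckets, hb]
      have hbeq : pvBuckets (d.insert t rest) ts = pvBuckets d ts := by
        apply List.map_congr_left
        intro u hu
        have : u ≠ t := fun he => htn (he ▸ hu)
        rw [PySem.Dict.getD_insert_of_ne _ _ _ this]
      rw [hbk] at h ⊢
      have hH : pvHeads ((x :: rest) :: pvBuckets d ts) = x :: pvHeads (pvBuckets d ts) := by
        simp [pvHeads]
      rw [hH] at h ⊢
      simp only [pvInnerA, hb]
      have hlen : ¬ (n ≤ ((sel ++ [x]).length : Int)) := by
        simp only [List.length_append, List.length_cons, List.length_nil] at *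
        push_cast at *
        omega
      simp only [hlen, ite_false]
      have h' : (((sel ++ [x]).length : Int)) + (pvHeads (pvBuckets (d.insert t rest) ts)).length < n := by
        rw [hbeq]
        simp only [List.length_append, List.length_cons, List.length_nil] at h ⊢
        push_cast at h ⊢
        omega
      obtain ⟨h1, h2, h3, h4⟩ := ih (d.insert t rest) (sel ++ [x]) true hts' h'
      refine ⟨by rw [h1, hbeq]; simp, by simp [h2], h3, ?_⟩
      intro u
      rw [h4 u]
      by_cases hut : u = t
      · subst hut
        simp [htn, hb, PySem.Dict.getD_insert_self]
      · rw [PySem.Dict.getD_insert_of_ne _ _ _ hut]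
        by_cases hu : u ∈ ts
        · simp [hu]
        · simp [hu, hut]

lemma pvInnerA_break (n : Int) (ts : List String) (d : PySem.Dict String (List String))
    (sel : List String) (prog : Bool) (hts : ts.Nodup)
    (hlt : (sel.length : Int) < n)
    (h : n ≤ (sel.length : Int) + (pvHeads (pvBuckets d ts)).length) :
    (pvInnerA n ts d sel prog).1 =
      sel ++ (pvHeads (pvBuckets d ts)).take ((n - sel.length).toNat) ∧
    (pvInnerA n ts d sel prog).2.2.2 = true := by
  induction ts generalizing d sel prog with
  | nil =>
    exfalso
    simp [pvHeads, pvBuckets] at h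
    omega
  | cons t ts ih =>
    obtain ⟨htn, hts'⟩ := List.nodup_cons.mp hts
    cases hb : d.getD t [] with
    | nil =>
      have hbk : pvBuckets d (t :: ts) = [] :: pvBuckets d ts := by simp [pvBuckets, hb]
      have hH : pvHeads ([] :: pvBuckets d ts) = pvHeads (pvBuckets d ts) := by simp [pvHeads]
      rw [hbk, hH] at h ⊢
      simp only [pvInnerA, hb]
      exact ih d sel prog hts' hlt h
    | cons x rest =>
      have hbk : pvBuckets d (t :: ts) = (x :: rest) :: pvBuckets d ts := by simp [pvBuckets, hb]
      have hbeq : pvBuckets (d.insert t rest) ts = pvBuckets d ts := by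
        apply List.map_congr_left
        intro u hu
        have : u ≠ t := fun he => htn (he ▸ hu)
        rw [PySem.Dict.getD_insert_of_ne _ _ _ this]
      have hH : pvHeads ((x :: rest) :: pvBuckets d ts) = x :: pvHeads (pvBuckets d ts) := by
        simp [pvHeads]
      rw [hbk, hH] at h ⊢
      simp only [pvInnerA, hb]
      by_cases hstop : n ≤ ((sel ++ [x]).length : Int)
      · simp only [hstop, ite_true]
        have hk : (n - (sel.length : Int)).toNat = 1 := by
          simp only [List.length_append, List.length_cons, List.length_nil] at hstop
          push_cast at hstop
          omega
        rw [hk]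
        simp
      · simp only [hstop, ite_false]
        have hlt' : (((sel ++ [x]).length : Int)) < n := by
          simp at hstop ⊢
          omega
        have h' : n ≤ (((sel ++ [x]).length : Int)) + (pvHeads (pvBuckets (d.insert t rest) ts)).length := by
          rw [hbeq]
          simp only [List.length_append, List.length_cons, List.length_nil] at h ⊢
          push_cast at h ⊢
          omega
        obtain ⟨h1, h2⟩ := ih (d.insert t rest) (sel ++ [x]) true hts' hlt' h'
        rw [hbeq] at h1
        refine ⟨?_, h2⟩
        rw [h1]
        have harith : (n - (sel.length : Int)).toNat = ((n - ((sel.length : Int) + 1)).toNat) + 1 := by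
          omega
        have : (n - (((sel ++ [x]).length : Int))).toNat = (n - ((sel.length : Int) + 1)).toNat := by
          simp only [List.length_append, List.length_cons, List.length_nil]
          push_cast
          ring_nf
        rw [this, harith]
        simp [List.take_succ_cons]

lemma pvWhileA_spec (n : Int) (hn : 0 < n) :
    ∀ (fuel : Nat) (d : PySem.Dict String (List String)) (ts : List String)
      (sel : List String) (K : Nat),
      ts.Nodup →
      (sel.length : Int) < n →
      ((pvBuckets d ts).map List.length).sum < fuel →
      (∀ b ∈ pvBuckets d ts, b.length ≤ K) →
      pvWhileA n fuel d ts sel = sel ++ (pvRR K (pvBuckets d ts)).take ((n - sel.length).toNat) := by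
  intro fuel
  induction fuel with
  | zero => intro d ts sel K _ _ hf _; omega
  | succ fuel ih =>
    intro d ts sel K hts hsel hf hK
    simp only [pvWhileA, hsel, ite_true]
    by_cases hempty : pvHeads (pvBuckets d ts) = []
    · -- no bucket has a head: the pass makes no progress and the loop stops
      have hall := (pvHeads_eq_nil_iff _).mp hempty
      obtain ⟨h1, h2, h3, _⟩ := pvInnerA_no_break n ts d sel false hts (by rw [hempty]; simpa using hsel)
      rcases hr : pvInnerA n ts d sel false with ⟨sel', d', prog, broke⟩
      rw [hr] at h1 h2 h3
      simp only at h1 h2 h3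
      subst h3
      rw [hempty] at h1 h2
      simp at h1 h2
      subst h2
      simp only [ite_false, Bool.false_eq_true]
      rw [h1, pvRR_all_nil K _ hall]
      simp
    · -- some bucket is nonempty, so K ≥ 1
      obtain ⟨b0, hb0, hb0ne⟩ : ∃ b ∈ pvBuckets d ts, b ≠ [] := by
        by_contra hc
        push_neg at hc
        exact hempty ((pvHeads_eq_nil_iff _).mpr hc)
      have hK1 : 1 ≤ K := le_trans (by
        cases b0 with
        | nil => exact absurd rfl hb0ne
        | cons a l => simp) (hK b0 hb0)
      obtain ⟨K', rfl⟩ : ∃ K', K = K' + 1 := ⟨K - 1, by omega⟩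
      have hrr : pvRR (K' + 1) (pvBuckets d ts) =
          pvHeads (pvBuckets d ts) ++ pvRR K' ((pvBuckets d ts).map List.tail) := rfl
      by_cases hbr : n ≤ (sel.length : Int) + (pvHeads (pvBuckets d ts)).length
      · -- the inner loop breaks at sample_size
        obtain ⟨h1, h3⟩ := pvInnerA_break n ts d sel false hts hsel hbr
        rcases hr : pvInnerA n ts d sel false with ⟨sel', d', prog, broke⟩
        rw [hr] at h1 h3
        simp only at h1 h3
        subst h3
        simp only [ite_true]
        rw [h1, hrr, List.take_append]
        have : ((n - (sel.length : Int)).toNat - (pvHeads (pvBuckets d ts)).length) = 0 := by omega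
        rw [this]
        simp
      · -- a full pass: all heads are taken and the loop continues on the tails
        push_neg at hbr
        obtain ⟨h1, h2, h3, h4⟩ := pvInnerA_no_break n ts d sel false hts hbr
        rcases hr : pvInnerA n ts d sel false with ⟨sel', d', prog, broke⟩
        rw [hr] at h1 h2 h3 h4
        simp only at h1 h2 h3 h4
        subst h3
        have hne : (pvHeads (pvBuckets d ts)).isEmpty = false := by
          cases hh : pvHeads (pvBuckets d ts)
          · exact absurd hh hempty
          · rfl
        rw [hne] at h2
        simp at h2
        subst h2
        simp only [ite_false, ite_true, Bool.false_eq_true]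
        have hbuck' : pvBuckets d' ts = (pvBuckets d ts).map List.tail := by
          apply List.ext_getElem
          · simp [pvBuckets]
          · intro i hi1 hi2
            simp only [pvBuckets, List.getElem_map]
            rw [h4]
            simp only [pvBuckets, List.length_map] at hi1
            rw [if_pos (List.getElem_mem _)]
        have hsel' : ((sel ++ pvHeads (pvBuckets d ts)).length : Int) < n := by
          simp
          push_cast
          omega
        have hsum : ((pvBuckets d' ts).map List.length).sum < fuel := by
          rw [hbuck']
          have := pvSum_tails (pvBuckets d ts)
          have hhl : 1 ≤ (pvHeads (pvBuckets d ts)).length := by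
            cases hh : pvHeads (pvBuckets d ts)
            · exact absurd hh hempty
            · simp
          omega
        have hK' : ∀ b ∈ pvBuckets d' ts, b.length ≤ K' := by
          rw [hbuck']
          intro b hb
          obtain ⟨b', hb', rfl⟩ := List.mem_map.mp hb
          have := hK b' hb'
          cases b' <;> simp at * <;> omega
        rw [h1, ih d' ts (sel ++ pvHeads (pvBuckets d ts)) K' hts hsel' hsum hK', hbuck', hrr]
        rw [List.take_append]
        have h5 : (pvHeads (pvBuckets d ts)).length ≤ (n - (sel.length : Int)).toNat := by omega
        rw [List.take_of_length_le h5]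
        have h6 : (n - ((sel ++ pvHeads (pvBuckets d ts)).length : Int)).toNat =
            (n - (sel.length : Int)).toNat - (pvHeads (pvBuckets d ts)).length := by
          simp only [List.length_append]
          push_cast
          omega
        rw [h6, List.append_assoc]

lemma pvRow_zero (bs : List (List String)) :
    (bs.filter (fun b => decide (0 < b.length))).map (fun b => b.getD 0 "") = pvHeads bs := by
  induction bs with
  | nil => rfl
  | cons b bs ih => cases b <;> simp [pvHeads] at * <;> exact ih

lemma pvRow_succ (i : Nat) (bs : List (List String)) :
    (bs.filter (fun b => decide (i + 1 < b.length))).map (fun b => b.getD (i + 1) "") =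
    ((bs.map List.tail).filter (fun b => decide (i < b.length))).map (fun b => b.getD i "") := by
  induction bs with
  | nil => rfl
  | cons b bs ih =>
    cases b with
    | nil => simpa using ih
    | cons x r =>
      by_cases h : i < r.length <;> simp [h] <;> exact ih

lemma pvRows_eq_rr : ∀ (k : Nat) (bs : List (List String)),
    (List.range k).flatMap
      (fun i => (bs.filter (fun b => decide (i < b.length))).map (fun b => b.getD i "")) =
    pvRR k bs := by
  intro k
  induction k with
  | zero => intro bs; rfl
  | succ k ih =>
    intro bs
    rw [List.range_succ_eq_map, List.flatMap_cons, List.flatMap_map]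
    simp only [Nat.succ_eq_add_one]
    rw [pvRow_zero]
    simp only [fun i => pvRow_succ i bs]
    rw [ih (bs.map List.tail)]
    rfl

-- the i-th row of the transpose, moved from Python's Int index to the Nat index
lemma pvRowInt (bs : List (List String)) (k : Nat) :
    (bs.filter (fun b => decide ((k : Int) < PySem.List.len b))).map
      (fun b => PySem.List.pyGetD b (k : Int) "") =
    (bs.filter (fun b => decide (k < b.length))).map (fun b => b.getD k "") := by
  simp [PySem.List.len_eq, PySem.List.pyGetD_natCast]

lemma pvByType_getD (d0 : PySem.Dict String (List (String × String))) (es : List String) (t : String) :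
    ((es.foldl (fun bt e => bt.modify (pvEntityType d0 e) [] (fun b => b ++ [e]))
        PySem.Dict.empty : PySem.Dict String (List String))).getD t [] =
    es.filter (fun e => pvEntityType d0 e == t) := by
  have : (es.foldl (fun bt e => bt.modify (pvEntityType d0 e) [] (fun b => b ++ [e]))
        PySem.Dict.empty : PySem.Dict String (List String)) =
      (es.map (fun e => (pvEntityType d0 e, e))).foldl
        (fun bt p => bt.modify p.1 [] (fun b => b ++ [p.2])) PySem.Dict.empty := by
    rw [List.foldl_map]
  rw [this, PySem.Dict.getD_foldl_modify_append]
  rw [List.filter_map, List.map_map]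
  simp only [PySem.Dict.getD_empty, List.nil_append]
  rw [show ((fun (x : String × String) => x.2) ∘ fun e => (pvEntityType d0 e, e)) = id from rfl]
  rw [show ((fun (p : String × String) => p.1 == t) ∘ fun e => (pvEntityType d0 e, e)) =
      (fun e => pvEntityType d0 e == t) from rfl]
  simp

lemma pvByType_keys (d0 : PySem.Dict String (List (String × String))) (es : List String) :
    ((es.foldl (fun bt e => bt.modify (pvEntityType d0 e) [] (fun b => b ++ [e]))
        PySem.Dict.empty : PySem.Dict String (List String))).keys =
    PySem.Set.ofList (es.map (fun e => pvEntityType d0 e)) := by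
  rw [PySem.Dict.keys_foldl_modify_key es (fun e => pvEntityType d0 e) []
      (fun _ e => (fun b => b ++ [e]))]
  rw [PySem.Dict.keys_empty, PySem.Set.update_nil_left]

-- the positive-sample_size branches of the two ports agree (for ANY id list es)
lemma pvMain (d0 : PySem.Dict String (List (String × String))) (es : List String)
    (n : Int) (hn : 0 < n) :
    (let byType := es.foldl (fun bt e => bt.modify (pvEntityType d0 e) [] (fun b => b ++ [e]))
        PySem.Dict.empty
     pvWhileA n ((byType.values.map List.length).sum + 1) byType
       (PySem.List.sorted byType.keys (fun x => x) false) []) =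
    (let types := PySem.List.sorted
        (PySem.Set.ofList (es.map (fun e => pvEntityType d0 e))) (fun x => x) false
     let buckets := types.map (fun t => es.filter (fun e => pvEntityType d0 e == t))
     let width : Int := PySem.List.maxD (buckets.map (fun b => PySem.List.len b)) (fun x => x) 0
     let flat := (PySem.List.pyRange 0 width 1).flatMap
        (fun i => (buckets.filter (fun b => decide (i < PySem.List.len b))).map
          (fun b => PySem.List.pyGetD b i ""))
     PySem.List.slice flat none (some n)) := by
  dsimp only
  have hkeys := pvByType_keys d0 es
  set byType := (es.foldl (fun bt e => bt.modify (pvEntityType d0 e) [] (fun b => b ++ [e]))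
      PySem.Dict.empty : PySem.Dict String (List String)) with hbt
  rw [hkeys]
  set ts := PySem.List.sorted (PySem.Set.ofList (es.map (fun e => pvEntityType d0 e)))
      (fun x => x) false with hts
  set bucketsB := ts.map (fun t => es.filter (fun e => pvEntityType d0 e == t)) with hbk
  have hbs : pvBuckets byType ts = bucketsB := by
    rw [hbk]
    exact List.map_congr_left (fun t _ => pvByType_getD d0 es t)
  set width := PySem.List.maxD (bucketsB.map (fun b => PySem.List.len b)) (fun x => x) 0 with hw
  have hKb : ∀ b ∈ bucketsB, b.length ≤ width.toNat := by
    intro b hb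
    cases hmax : PySem.List.max? (bucketsB.map (fun b => PySem.List.len b)) (fun x => x) with
    | none =>
      exact absurd (List.map_eq_nil_iff.mp ((PySem.List.max?_eq_none_iff _ _).mp hmax) ▸ hb)
        (List.not_mem_nil)
    | some m =>
      have hle := PySem.List.max?_isMax hmax (PySem.List.len b)
        (List.mem_map_of_mem hb)
      have hwm : width = m := by rw [hw]; unfold PySem.List.maxD; rw [hmax]; rfl
      rw [hwm]
      simp only [PySem.List.len_eq] at hle
      omega
  have hnd : ts.Nodup := (PySem.List.sorted_perm _ _ _).nodup_iff.mpr (PySem.Set.nodup_ofList _)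
  have hfuel : ((pvBuckets byType ts).map List.length).sum < (byType.values.map List.length).sum + 1 := by
    have hkn : byType.keys.Nodup := by rw [hkeys]; exact PySem.Set.nodup_ofList _
    rw [PySem.Dict.values_eq_map_keys byType hkn []]
    have hperm : ts.Perm byType.keys := by rw [hkeys]; exact PySem.List.sorted_perm _ _ _
    have heq : ((pvBuckets byType ts).map List.length).sum =
        ((byType.keys.map (fun k => byType.getD k [])).map List.length).sum := by
      unfold pvBuckets
      rw [List.map_map, List.map_map]
      exact (hperm.map _).sum_eq
    rw [heq, List.map_map]
    omega
  rw [pvWhileA_spec n hn _ byType ts [] width.toNat hnd (by simpa using hn) hfuel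
      (hbs ▸ hKb)]
  rw [PySem.List.slice_to _ (by omega : (0:Int) ≤ n)]
  rw [PySem.List.pyRange_zero, List.flatMap_map]
  simp only [pvRowInt]
  rw [pvRows_eq_rr, hbs]
  simp

-- ===== VERDICT (by name: the statement is the Claim_ definition above) =====
theorem sample_entity_ids_by_type_py_spec : Claim_equal_sample_entity_ids_by_type_py := by
  intro answers sample_size _
  unfold Spec_sample_entity_ids_by_type_py
  unfold sample_entity_ids_by_type_py sample_entity_ids_by_type_py_alt
  cases sample_size with
  | none => rfl
  | some n =>
    dsimp only
    split_ifs with h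
    · rfl
    · exact pvMain (PySem.Dict.ofList answers)
        (PySem.List.sorted (PySem.Dict.ofList answers).keys (fun x => x) false) n (by omega)
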